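-- pv_equiv track=rewrite | github.com/897754/Baekjoon | 백준/Silver/2468. 안전 영역/안전 영역.py | Sink
-- ===== SOURCE A (Python) =====
-- def Sink(heightArr, n, height):
--
--
--     sunkArr = []
--
--     for i in range(n):
--         sunkArr.append([])
--         for j in range(n):
--             sunkArr[i].append(0)
--
--     for x in range(n):
--         for y in range(n):
--             if heightArr[x][y] <= height:
--                 sunkArr[x][y] = 1
--
--     #PrintArr(sunkArr)
--
--     #탐색할 배열 초기화
--     checkArr = []
--     for i in range(n):
--         checkArr.append([])
--         for j in range(n):
--             checkArr[i].append(0)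
--
--     #탐색 시작
--     count = 0
--     for x in range(n):
--         for y in range(n):
--             #잠기지 않았고 확인하지 않은 위치 발견
--             if not checkArr[x][y] and not sunkArr[x][y]:
--                 count+=1
--                 PaintArea(checkArr, sunkArr, x,y,n)
--
--     return count
--
-- def PaintArea(checkArr, sunkArr, x,y,n):
--     checkArr[x][y] = 1
--
--     curX = 0+x
--     curY = 1+y
--     if curX >= 0 and curX < n and curY >= 0 and curY < n and not checkArr[curX][curY] and not sunkArr[curX][curY]:
--         PaintArea(checkArr,sunkArr,curX,curY,n)
--     curX = 0+x
--     curY = -1+y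
--     if curX >= 0 and curX < n and curY >= 0 and curY < n and not checkArr[curX][curY] and not sunkArr[curX][curY]:
--         PaintArea(checkArr,sunkArr,curX,curY,n)
--     curX = 1+x
--     curY = 0+y
--     if curX >= 0 and curX < n and curY >= 0 and curY < n and not checkArr[curX][curY] and not sunkArr[curX][curY]:
--         PaintArea(checkArr,sunkArr,curX,curY,n)
--     curX = -1+x
--     curY = 0+y
--     if curX >= 0 and curX < n and curY >= 0 and curY < n and not checkArr[curX][curY] and not sunkArr[curX][curY]:
--         PaintArea(checkArr,sunkArr,curX,curY,n)
-- ===== SOURCE B (Python) =====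
-- def Sink(heightArr, n, height):
--     # Same scan order as A, but an explicit-stack flood fill over a set of
--     # visited coordinates instead of recursive painting of two 2-D mark arrays.
--     visited = set()
--     count = 0
--     for x in range(n):
--         for y in range(n):
--             if (x, y) not in visited and heightArr[x][y] > height:
--                 count += 1
--                 stack = [(x, y)]
--                 while stack:
--                     cx, cy = stack.pop()
--                     if 0 <= cx < n and 0 <= cy < n and (cx, cy) not in visited \
--                             and heightArr[cx][cy] > height:
--                         visited.add((cx, cy))
--                         stack.append((cx - 1, cy))
--                         stack.append((cx + 1, cy))
--                         stack.append((cx, cy - 1))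
--                         stack.append((cx, cy + 1))
--     return count
-- ===== Notes on version B (the rewrite author's own statement) =====
-- stated objective: simpler
-- what changed: Replaces the recursive four-way paint over two freshly built n-by-n mark arrays (sunkArr and checkArr) with a single explicit-stack flood fill over one set of visited coordinates, reading heightArr directly instead of precomputing a sunk array.
import Mathlib
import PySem

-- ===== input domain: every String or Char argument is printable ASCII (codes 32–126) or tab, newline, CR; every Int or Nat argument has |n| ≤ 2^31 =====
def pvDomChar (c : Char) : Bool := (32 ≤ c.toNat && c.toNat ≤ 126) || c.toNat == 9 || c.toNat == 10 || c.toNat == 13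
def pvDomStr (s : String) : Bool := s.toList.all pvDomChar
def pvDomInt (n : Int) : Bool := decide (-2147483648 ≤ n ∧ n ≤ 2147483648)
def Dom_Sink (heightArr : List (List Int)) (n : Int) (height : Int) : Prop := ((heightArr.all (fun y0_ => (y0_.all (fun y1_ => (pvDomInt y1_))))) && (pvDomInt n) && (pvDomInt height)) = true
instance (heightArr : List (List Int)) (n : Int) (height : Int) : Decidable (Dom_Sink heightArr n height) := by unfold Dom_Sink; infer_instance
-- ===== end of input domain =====

-- B replaces the recursive paint over two freshly built n×n mark arrays with one
-- explicit-stack flood fill over a set of visited coordinates (objective: simpler).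

-- 2-D read arr[x][y] / write arr[x][y] = v, shared indexing helpers; exact for the
-- in-range accesses the guards and Pre_ ensure (the getD defaults are never hit there).
def pvGet2 (a : List (List Int)) (x y : Nat) : Int := (a.getD x []).getD y 0
def pvSet2 (a : List (List Int)) (x y : Nat) (v : Int) : List (List Int) :=
  a.set x ((a.getD x []).set y v)

-- ===== PORT A =====
-- the n×n zero array A builds with append loops
def pvZeros (m : Nat) : List (List Int) :=
  (List.range m).foldl
    (fun a _ => a ++ [(List.range m).foldl (fun r _ => r ++ [(0 : Int)]) []]) []

-- sunkArr: 1 where heightArr[x][y] <= height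
def pvSunk (hA : List (List Int)) (n h : Int) : List (List Int) :=
  (List.range n.toNat).foldl (fun s x =>
    (List.range n.toNat).foldl (fun s y =>
      if pvGet2 hA x y ≤ h then pvSet2 s x y 1 else s) s) (pvZeros n.toNat)

-- PaintArea, ported with fuel: fuel n*n+1 strictly exceeds the number of unmarked
-- cells, and every nested call first marks a fresh cell, so fuel is never exhausted.
-- (0+x, 1+y, -1+y, … are written x, y+1, y-1, … .)
def pvPaint (fuel : Nat) (check sunk : List (List Int)) (x y n : Int) : List (List Int) :=
  match fuel with
  | 0 => check
  | fuel + 1 =>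
    let c0 := pvSet2 check x.toNat y.toNat 1
    let c1 := if 0 ≤ x ∧ x < n ∧ 0 ≤ y + 1 ∧ y + 1 < n ∧
        pvGet2 c0 x.toNat (y+1).toNat = 0 ∧ pvGet2 sunk x.toNat (y+1).toNat = 0 then
        pvPaint fuel c0 sunk x (y+1) n else c0
    let c2 := if 0 ≤ x ∧ x < n ∧ 0 ≤ y - 1 ∧ y - 1 < n ∧
        pvGet2 c1 x.toNat (y-1).toNat = 0 ∧ pvGet2 sunk x.toNat (y-1).toNat = 0 then
        pvPaint fuel c1 sunk x (y-1) n else c1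
    let c3 := if 0 ≤ x + 1 ∧ x + 1 < n ∧ 0 ≤ y ∧ y < n ∧
        pvGet2 c2 (x+1).toNat y.toNat = 0 ∧ pvGet2 sunk (x+1).toNat y.toNat = 0 then
        pvPaint fuel c2 sunk (x+1) y n else c2
    let c4 := if 0 ≤ x - 1 ∧ x - 1 < n ∧ 0 ≤ y ∧ y < n ∧
        pvGet2 c3 (x-1).toNat y.toNat = 0 ∧ pvGet2 sunk (x-1).toNat y.toNat = 0 then
        pvPaint fuel c3 sunk (x-1) y n else c3
    c4

def Sink (heightArr : List (List Int)) (n : Int) (height : Int) : Int :=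
  let m := n.toNat
  let sunk := pvSunk heightArr n height
  ((List.range m).foldl (fun (st : List (List Int) × Int) x =>
    (List.range m).foldl (fun st y =>
      if pvGet2 st.1 x y = 0 ∧ pvGet2 sunk x y = 0 then
        (pvPaint (m * m + 1) st.1 sunk (x : Int) (y : Int) n, st.2 + 1)
      else st) st) (pvZeros m, 0)).2

-- ===== PORT B =====
-- all grid coordinates; used only by the termination measure of the while loop
def pvGrid (m : Nat) : List (Int × Int) :=
  (List.range m).flatMap (fun x => (List.range m).map (fun y => ((x : Int), (y : Int))))

theorem pvMem_grid {m : Nat} {c : Int × Int} :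
    c ∈ pvGrid m ↔ 0 ≤ c.1 ∧ c.1 < (m : Int) ∧ 0 ≤ c.2 ∧ c.2 < (m : Int) := by
  obtain ⟨a, b⟩ := c
  simp [pvGrid]
  constructor
  · rintro ⟨⟨x, hx, rfl⟩, ⟨y, hy, rfl⟩⟩
    refine ⟨by omega, by omega, by omega, by omega⟩
  · rintro ⟨h1, h2, h3, h4⟩
    exact ⟨⟨a.toNat, by omega, by omega⟩, ⟨b.toNat, by omega, by omega⟩⟩

-- termination helper for the while loop: marking a fresh in-grid cell shrinks the
-- number of unvisited grid cells
theorem pvCnt_lt (m : Nat) (v : List (Int × Int)) (c : Int × Int)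
    (hg : c ∈ pvGrid m) (hv : c ∉ v) :
    ((pvGrid m).filter (fun d => decide (d ∉ PySem.Set.add v c))).length <
      ((pvGrid m).filter (fun d => decide (d ∉ v))).length := by
  have hsub : List.Sublist ((pvGrid m).filter (fun d => decide (d ∉ PySem.Set.add v c)))
      ((pvGrid m).filter (fun d => decide (d ∉ v))) := by
    apply List.monotone_filter_right
    intro d hd
    simp only [decide_eq_true_eq] at *
    simp only [PySem.Set.mem_add] at hd
    tauto
  have hc1 : c ∈ (pvGrid m).filter (fun d => decide (d ∉ v)) := by
    simp [hg, hv]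
  have hc2 : c ∉ (pvGrid m).filter (fun d => decide (d ∉ PySem.Set.add v c)) := by
    simp [PySem.Set.mem_add]
  refine lt_of_le_of_ne hsub.length_le (fun he => hc2 ?_)
  rw [hsub.eq_of_length he]; exact hc1

-- the while loop: pop (head), re-check bounds/visited/height, mark and push the
-- four neighbours (Python appends then pops from the end; head-first list order)
def pvRunB (hA : List (List Int)) (n h : Int) (visited : List (Int × Int)) :
    List (Int × Int) → List (Int × Int)
  | [] => visited
  | (cx, cy) :: rest =>
    if hg : 0 ≤ cx ∧ cx < n ∧ 0 ≤ cy ∧ cy < n ∧ (cx, cy) ∉ visited ∧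
        h < pvGet2 hA cx.toNat cy.toNat then
      pvRunB hA n h (PySem.Set.add visited (cx, cy))
        ((cx, cy + 1) :: (cx, cy - 1) :: (cx + 1, cy) :: (cx - 1, cy) :: rest)
    else
      pvRunB hA n h visited rest
  termination_by stack =>
    5 * ((pvGrid n.toNat).filter (fun d => decide (d ∉ visited))).length + stack.length
  decreasing_by
  · have hgmem : (cx, cy) ∈ pvGrid n.toNat := by
      refine pvMem_grid.mpr ⟨by omega, by omega, by omega, by omega⟩
    have := pvCnt_lt n.toNat visited (cx, cy) hgmem hg.2.2.2.2.1
    simp only [List.length_cons]; omega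
  · simp only [List.length_cons]; omega

def Sink_alt (heightArr : List (List Int)) (n : Int) (height : Int) : Int :=
  let m := n.toNat
  ((List.range m).foldl (fun (st : List (Int × Int) × Int) (x : Nat) =>
    (List.range m).foldl (fun st (y : Nat) =>
      if ((x : Int), (y : Int)) ∉ st.1 ∧ height < pvGet2 heightArr x y then
        (pvRunB heightArr n height st.1 [((x : Int), (y : Int))], st.2 + 1)
      else st) st) (([] : List (Int × Int)), (0 : Int))).2

-- ===== PRECONDITION & SPEC =====
-- Pre_ excludes exactly the inputs where A raises IndexError: fewer than n rows, or
-- one of the first n rows shorter than n (A reads heightArr[x][y] for all x,y < n).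
def Pre_Sink (heightArr : List (List Int)) (n : Int) (height : Int) : Prop :=
  0 < n → (n ≤ (heightArr.length : Int) ∧
    ∀ row ∈ heightArr.take n.toNat, n ≤ (row.length : Int))
instance (heightArr : List (List Int)) (n : Int) (height : Int) :
    Decidable (Pre_Sink heightArr n height) := by unfold Pre_Sink; infer_instance

def pvWitness_Sink : List (List Int) × Int × Int := ([[9, 2], [3, 9]], 2, 4)

def Spec_Sink (heightArr : List (List Int)) (n : Int) (height : Int) (out : Int) : Prop :=
  out = Sink_alt heightArr n height
instance (heightArr : List (List Int)) (n : Int) (height : Int) (out : Int) :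
    Decidable (Spec_Sink heightArr n height out) := by unfold Spec_Sink; infer_instance

-- ===== CLAIM (what is proved, stated in full; the proofs are below) =====
def Claim_equal_Sink : Prop := ∀ (heightArr : List (List Int)) (n : Int) (height : Int),
  Dom_Sink heightArr n height → Pre_Sink heightArr n height →
  Spec_Sink heightArr n height (Sink heightArr n height)

-- ===== LEMMAS AND PROOFS =====

-- dimensions of a 2-D array
def pvDims (a : List (List Int)) (m : Nat) : Prop :=
  a.length = m ∧ ∀ r ∈ a, r.length = m

-- the simulation invariant: check array ↔ visited set
def pvR (m : Nat) (v : List (Int × Int)) (c : List (List Int)) : Prop :=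
  pvDims c m ∧ ∀ x y : Nat, x < m → y < m →
    pvGet2 c x y = (if ((x : Int), (y : Int)) ∈ v then 1 else 0)

-- number of unvisited grid cells (the fuel/termination measure)
def pvCnt (m : Nat) (v : List (Int × Int)) : Nat :=
  ((pvGrid m).filter (fun d => decide (d ∉ v))).length

theorem pvDims_set2 {a : List (List Int)} {m : Nat} (x y : Nat) (v : Int)
    (hd : pvDims a m) : pvDims (pvSet2 a x y v) m := by
  obtain ⟨hl, hr⟩ := hd
  by_cases hx : x < a.length
  · have hrow : (a.getD x []).length = m := by
      rw [List.getD_eq_getElem?_getD, List.getElem?_eq_getElem hx]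
      exact hr _ (List.getElem_mem hx)
    refine ⟨by simp [pvSet2, hl], ?_⟩
    intro r hrm
    rcases List.mem_or_eq_of_mem_set hrm with hra | rfl
    · exact hr r hra
    · simpa using hrow
  · have : pvSet2 a x y v = a := by
      unfold pvSet2
      exact List.set_eq_of_length_le (by omega)
    rw [this]; exact ⟨hl, hr⟩

theorem pvGet2_set2 {a : List (List Int)} {m x y : Nat} (v : Int)
    (hd : pvDims a m) (hx : x < m) (hy : y < m) (x' y' : Nat) :
    pvGet2 (pvSet2 a x y v) x' y' = if x' = x ∧ y' = y then v else pvGet2 a x' y' := by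
  obtain ⟨hl, hr⟩ := hd
  have hxa : x < a.length := by omega
  have hrow : (a[x]?.getD []).length = m := by
    rw [List.getElem?_eq_getElem hxa]
    exact hr _ (List.getElem_mem hxa)
  unfold pvGet2 pvSet2
  simp only [List.getD_eq_getElem?_getD]
  by_cases hx' : x' = x
  · subst hx'
    rw [List.getElem?_set_self hxa]
    simp only [Option.getD_some]
    by_cases hy' : y' = y
    · subst hy'
      rw [List.getElem?_set_self (by omega)]
      simp
    · rw [List.getElem?_set_ne (by omega)]
      simp [hy']
  · rw [List.getElem?_set_ne (by omega)]
    simp [hx']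

theorem pvZeros_eq (m : Nat) : pvZeros m = List.replicate m (List.replicate m 0) := by
  unfold pvZeros
  simp only [PySem.List.foldl_append_singleton_eq_map]
  simp [List.map_const']

theorem pvDims_zeros (m : Nat) : pvDims (pvZeros m) m := by
  rw [pvZeros_eq]
  exact ⟨by simp, by intro r hrm; rw [List.eq_of_mem_replicate hrm]; simp⟩

theorem pvGet2_zeros (m x y : Nat) : pvGet2 (pvZeros m) x y = 0 := by
  rw [pvZeros_eq]
  unfold pvGet2
  simp only [List.getD_eq_getElem?_getD, List.getElem?_replicate]
  split_ifs <;> simp [List.getElem?_replicate] <;> split_ifs <;> simp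

-- the inner row-filling loop of sunkArr
theorem pvSunkInner_dims (hA : List (List Int)) (h : Int) {m : Nat} (x : Nat)
    (ys : List Nat) (s : List (List Int)) (hd : pvDims s m) :
    pvDims (ys.foldl (fun s y => if pvGet2 hA x y ≤ h then pvSet2 s x y 1 else s) s) m := by
  induction ys generalizing s with
  | nil => exact hd
  | cons y ys ih =>
    simp only [List.foldl_cons]
    apply ih
    split
    · exact pvDims_set2 x y 1 hd
    · exact hd

theorem pvSunkInner_get (hA : List (List Int)) (h : Int) {m : Nat} (x : Nat)
    (hx : x < m) (ys : List Nat) (hys : ∀ y ∈ ys, y < m)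
    (s : List (List Int)) (hd : pvDims s m) (x' y' : Nat) :
    pvGet2 (ys.foldl (fun s y => if pvGet2 hA x y ≤ h then pvSet2 s x y 1 else s) s) x' y' =
      if x' = x ∧ y' ∈ ys ∧ pvGet2 hA x y' ≤ h then 1 else pvGet2 s x' y' := by
  induction ys generalizing s with
  | nil => simp
  | cons y ys ih =>
    simp only [List.foldl_cons]
    rw [ih (fun z hz => hys z (List.mem_cons_of_mem _ hz)) _
      (by split; exacts [pvDims_set2 x y 1 hd, hd])]
    by_cases hc : pvGet2 hA x y ≤ h
    · rw [if_pos hc, pvGet2_set2 1 hd hx (hys y List.mem_cons_self)]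
      simp only [List.mem_cons]
      by_cases hx' : x' = x <;> by_cases hy' : y' = y <;>
        by_cases hmem : y' ∈ ys <;> by_cases hcy : pvGet2 hA x y' ≤ h <;>
        simp_all
    · rw [if_neg hc]
      simp only [List.mem_cons]
      by_cases hx' : x' = x <;> by_cases hy' : y' = y <;>
        by_cases hmem : y' ∈ ys <;> by_cases hcy : pvGet2 hA x y' ≤ h <;>
        simp_all <;> omega

theorem pvSunkOuter_get (hA : List (List Int)) (h : Int) {m : Nat}
    (xs : List Nat) (hxs : ∀ x ∈ xs, x < m)
    (s : List (List Int)) (hd : pvDims s m) (x' y' : Nat) :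
    pvGet2 (xs.foldl (fun s x =>
        (List.range m).foldl (fun s y => if pvGet2 hA x y ≤ h then pvSet2 s x y 1 else s) s) s) x' y' =
      if x' ∈ xs ∧ y' < m ∧ pvGet2 hA x' y' ≤ h then 1 else pvGet2 s x' y' := by
  induction xs generalizing s with
  | nil => simp
  | cons x xs ih =>
    simp only [List.foldl_cons]
    have hx : x < m := hxs x List.mem_cons_self
    rw [ih (fun z hz => hxs z (List.mem_cons_of_mem _ hz)) _
      (pvSunkInner_dims hA h x (List.range m) s hd)]
    rw [pvSunkInner_get hA h x hx (List.range m) (fun z hz => List.mem_range.mp hz) s hd]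
    simp only [List.mem_cons, List.mem_range]
    by_cases hx' : x' = x <;> by_cases hmem : x' ∈ xs <;>
      by_cases hy' : y' < m <;> by_cases hcy : pvGet2 hA x' y' ≤ h <;>
      simp_all

theorem pvSunk_char (hA : List (List Int)) (n h : Int) (x y : Nat)
    (hx : x < n.toNat) (hy : y < n.toNat) :
    pvGet2 (pvSunk hA n h) x y = if pvGet2 hA x y ≤ h then 1 else 0 := by
  unfold pvSunk
  rw [pvSunkOuter_get hA h (List.range n.toNat) (fun z hz => List.mem_range.mp hz)
    (pvZeros n.toNat) (pvDims_zeros n.toNat)]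
  rw [pvGet2_zeros]
  simp [List.mem_range, hx, hy]

theorem pvRunB_nil (hA : List (List Int)) (n h : Int) (v : List (Int × Int)) :
    pvRunB hA n h v [] = v := by
  rw [pvRunB]

theorem pvRunB_cons_pos (hA : List (List Int)) (n h : Int) (v : List (Int × Int))
    (cx cy : Int) (rest : List (Int × Int))
    (hg : 0 ≤ cx ∧ cx < n ∧ 0 ≤ cy ∧ cy < n ∧ (cx, cy) ∉ v ∧
      h < pvGet2 hA cx.toNat cy.toNat) :
    pvRunB hA n h v ((cx, cy) :: rest) =
      pvRunB hA n h (PySem.Set.add v (cx, cy))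
        ((cx, cy + 1) :: (cx, cy - 1) :: (cx + 1, cy) :: (cx - 1, cy) :: rest) := by
  rw [pvRunB]; rw [dif_pos hg]

theorem pvRunB_cons_neg (hA : List (List Int)) (n h : Int) (v : List (Int × Int))
    (cx cy : Int) (rest : List (Int × Int))
    (hg : ¬ (0 ≤ cx ∧ cx < n ∧ 0 ≤ cy ∧ cy < n ∧ (cx, cy) ∉ v ∧
      h < pvGet2 hA cx.toNat cy.toNat)) :
    pvRunB hA n h v ((cx, cy) :: rest) = pvRunB hA n h v rest := by
  rw [pvRunB]; rw [dif_neg hg]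

theorem pvRunB_subset (hA : List (List Int)) (n h : Int) (v : List (Int × Int))
    (s : List (Int × Int)) : v ⊆ pvRunB hA n h v s := by
  fun_induction pvRunB hA n h v s with
  | case1 => exact List.Subset.refl _
  | case2 v cx cy rest hg ih =>
    refine List.Subset.trans ?_ ih
    rw [PySem.Set.add_eq_ite]
    split
    · exact List.Subset.refl _
    · exact List.subset_append_left _ _
  | case3 v cx cy rest hg ih => exact ih

theorem pvCnt_anti (m : Nat) {v w : List (Int × Int)} (hvw : v ⊆ w) :
    pvCnt m w ≤ pvCnt m v := by
  unfold pvCnt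
  apply List.Sublist.length_le
  apply List.monotone_filter_right
  intro d hd
  simp only [decide_eq_true_eq] at *
  exact fun hdv => hd (hvw hdv)

theorem pvGrid_length (m : Nat) : (pvGrid m).length = m * m := by
  unfold pvGrid
  rw [List.length_flatMap]
  simp [List.map_const']

theorem pvCnt_le (m : Nat) (v : List (Int × Int)) : pvCnt m v ≤ m * m := by
  calc pvCnt m v ≤ (pvGrid m).length := List.length_filter_le _ _
    _ = m * m := pvGrid_length m

theorem pvCnt_add_lt (m : Nat) (v : List (Int × Int)) (c : Int × Int)
    (hg : c ∈ pvGrid m) (hv : c ∉ v) :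
    pvCnt m (PySem.Set.add v c) < pvCnt m v :=
  pvCnt_lt m v c hg hv

theorem pvR_mark {m : Nat} {v : List (Int × Int)} {c : List (List Int)} {x y : Int}
    (hR : pvR m v c) (hx0 : 0 ≤ x) (hx : x.toNat < m) (hy0 : 0 ≤ y) (hy : y.toNat < m) :
    pvR m (PySem.Set.add v (x, y)) (pvSet2 c x.toNat y.toNat 1) := by
  obtain ⟨hd, hval⟩ := hR
  refine ⟨pvDims_set2 _ _ 1 hd, ?_⟩
  intro x' y' hx' hy'
  rw [pvGet2_set2 1 hd hx hy]
  by_cases he : x' = x.toNat ∧ y' = y.toNat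
  · rcases he with ⟨rfl, rfl⟩
    have hmem : ((x.toNat : Int), (y.toNat : Int)) ∈ PySem.Set.add v (x, y) :=
      (PySem.Set.mem_add v (x, y) _).mpr (Or.inr (by simp only [Prod.mk.injEq]; omega))
    rw [if_pos ⟨rfl, rfl⟩, if_pos hmem]
  · have hne : ((x' : Int), (y' : Int)) ≠ (x, y) := by
      simp only [ne_eq, Prod.mk.injEq]; omega
    rw [if_neg he, hval x' y' hx' hy']
    simp [PySem.Set.mem_add, hne]

theorem pvRunB_append_aux (hA : List (List Int)) (n h : Int) :
    ∀ (k : Nat) (v : List (Int × Int)) (a b : List (Int × Int)),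
    5 * pvCnt n.toNat v + a.length ≤ k →
    pvRunB hA n h v (a ++ b) = pvRunB hA n h (pvRunB hA n h v a) b := by
  intro k
  induction k with
  | zero =>
    intro v a b hk
    have : a = [] := by
      cases a with
      | nil => rfl
      | cons c rest => simp at hk
    subst this
    rw [pvRunB_nil]; rfl
  | succ k ih =>
    intro v a b hk
    cases a with
    | nil => rw [pvRunB_nil]; rfl
    | cons c rest =>
      obtain ⟨cx, cy⟩ := c
      by_cases hg : 0 ≤ cx ∧ cx < n ∧ 0 ≤ cy ∧ cy < n ∧ (cx, cy) ∉ v ∧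
          h < pvGet2 hA cx.toNat cy.toNat
      · rw [List.cons_append, pvRunB_cons_pos hA n h v cx cy _ hg,
          pvRunB_cons_pos hA n h v cx cy _ hg]
        have hgm : (cx, cy) ∈ pvGrid n.toNat :=
          pvMem_grid.mpr ⟨by omega, by omega, by omega, by omega⟩
        have hlt := pvCnt_add_lt n.toNat v (cx, cy) hgm hg.2.2.2.2.1
        have := ih (PySem.Set.add v (cx, cy))
          ((cx, cy + 1) :: (cx, cy - 1) :: (cx + 1, cy) :: (cx - 1, cy) :: rest) b
          (by simp only [List.length_cons] at *; omega)
        simpa using this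
      · rw [List.cons_append, pvRunB_cons_neg hA n h v cx cy _ hg,
          pvRunB_cons_neg hA n h v cx cy _ hg]
        exact ih v rest b (by simp only [List.length_cons] at hk; omega)

theorem pvRunB_append (hA : List (List Int)) (n h : Int) (v : List (Int × Int))
    (a b : List (Int × Int)) :
    pvRunB hA n h v (a ++ b) = pvRunB hA n h (pvRunB hA n h v a) b :=
  pvRunB_append_aux hA n h (5 * pvCnt n.toNat v + a.length) v a b le_rfl

-- one guarded neighbour step of PaintArea against one pop of the while loop
theorem pvStep (hA : List (List Int)) (n h : Int) (f : Nat)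
    (hIH : ∀ (v : List (Int × Int)) (c : List (List Int)) (x y : Int),
      pvR n.toNat v c → pvCnt n.toNat v < f →
      (0 ≤ x ∧ x < n ∧ 0 ≤ y ∧ y < n ∧ (x, y) ∉ v ∧ h < pvGet2 hA x.toNat y.toNat) →
      pvR n.toNat (pvRunB hA n h v [(x, y)]) (pvPaint f c (pvSunk hA n h) x y n))
    (v : List (Int × Int)) (c : List (List Int)) (x y : Int)
    (hR : pvR n.toNat v c) (hcnt : pvCnt n.toNat v < f) :
    pvR n.toNat (pvRunB hA n h v [(x, y)])
      (if 0 ≤ x ∧ x < n ∧ 0 ≤ y ∧ y < n ∧ pvGet2 c x.toNat y.toNat = 0 ∧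
          pvGet2 (pvSunk hA n h) x.toNat y.toNat = 0 then
        pvPaint f c (pvSunk hA n h) x y n else c) := by
  by_cases hb : 0 ≤ x ∧ x < n ∧ 0 ≤ y ∧ y < n
  · have hx : x.toNat < n.toNat := by omega
    have hy : y.toNat < n.toNat := by omega
    have hcast : ((x.toNat : Int), (y.toNat : Int)) = (x, y) := by
      simp only [Prod.mk.injEq]; omega
    have hcheck : pvGet2 c x.toNat y.toNat = (if (x, y) ∈ v then 1 else 0) := by
      rw [hR.2 x.toNat y.toNat hx hy, hcast]
    have hsunkc := pvSunk_char hA n h x.toNat y.toNat hx hy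
    by_cases hvm : (x, y) ∈ v
    · have hA0 : ¬ (0 ≤ x ∧ x < n ∧ 0 ≤ y ∧ y < n ∧ pvGet2 c x.toNat y.toNat = 0 ∧
          pvGet2 (pvSunk hA n h) x.toNat y.toNat = 0) := by
        simp [hcheck, hvm]
      rw [if_neg hA0, pvRunB_cons_neg hA n h v x y [] (by simp [hvm]), pvRunB_nil]
      exact hR
    · by_cases hsafe : h < pvGet2 hA x.toNat y.toNat
      · have hA1 : 0 ≤ x ∧ x < n ∧ 0 ≤ y ∧ y < n ∧ pvGet2 c x.toNat y.toNat = 0 ∧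
            pvGet2 (pvSunk hA n h) x.toNat y.toNat = 0 := by
          refine ⟨hb.1, hb.2.1, hb.2.2.1, hb.2.2.2, by simp [hcheck, hvm], ?_⟩
          rw [hsunkc, if_neg (by omega)]
        rw [if_pos hA1]
        exact hIH v c x y hR hcnt ⟨hb.1, hb.2.1, hb.2.2.1, hb.2.2.2, hvm, hsafe⟩
      · have hA0 : ¬ (0 ≤ x ∧ x < n ∧ 0 ≤ y ∧ y < n ∧ pvGet2 c x.toNat y.toNat = 0 ∧
            pvGet2 (pvSunk hA n h) x.toNat y.toNat = 0) := by
          rw [hsunkc, if_pos (by omega)]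
          simp
        rw [if_neg hA0, pvRunB_cons_neg hA n h v x y [] (by tauto), pvRunB_nil]
        exact hR
  · have hA0 : ¬ (0 ≤ x ∧ x < n ∧ 0 ≤ y ∧ y < n ∧ pvGet2 c x.toNat y.toNat = 0 ∧
        pvGet2 (pvSunk hA n h) x.toNat y.toNat = 0) := by tauto
    rw [if_neg hA0, pvRunB_cons_neg hA n h v x y [] (by tauto), pvRunB_nil]
    exact hR

-- the key simulation: recursive paint (with enough fuel) marks exactly the cells the
-- stack machine visits
theorem pvSim (hA : List (List Int)) (n h : Int) :
    ∀ (f : Nat) (v : List (Int × Int)) (c : List (List Int)) (x y : Int),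
    pvR n.toNat v c → pvCnt n.toNat v < f →
    (0 ≤ x ∧ x < n ∧ 0 ≤ y ∧ y < n ∧ (x, y) ∉ v ∧ h < pvGet2 hA x.toNat y.toNat) →
    pvR n.toNat (pvRunB hA n h v [(x, y)]) (pvPaint f c (pvSunk hA n h) x y n) := by
  intro f
  induction f with
  | zero => intro v c x y _ hcnt _; omega
  | succ f ih =>
    intro v c x y hR hcnt hg
    rw [pvRunB_cons_pos hA n h v x y [] hg]
    have hlist : ((x, y + 1) :: (x, y - 1) :: (x + 1, y) :: (x - 1, y) :: ([] : List (Int × Int)))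
        = [(x, y + 1)] ++ ([(x, y - 1)] ++ ([(x + 1, y)] ++ [(x - 1, y)])) := by rfl
    rw [hlist, pvRunB_append, pvRunB_append, pvRunB_append]
    simp only [pvPaint]
    -- state after marking (x, y)
    have hgm : (x, y) ∈ pvGrid n.toNat :=
      pvMem_grid.mpr ⟨by omega, by omega, by omega, by omega⟩
    have hcnt1 : pvCnt n.toNat (PySem.Set.add v (x, y)) < f := by
      have := pvCnt_add_lt n.toNat v (x, y) hgm hg.2.2.2.2.1
      omega
    have hR1 : pvR n.toNat (PySem.Set.add v (x, y)) (pvSet2 c x.toNat y.toNat 1) :=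
      pvR_mark hR hg.1 (by omega) hg.2.2.1 (by omega)
    have h1 := pvStep hA n h f ih _ _ x (y + 1) hR1 hcnt1
    have hcnt2 : pvCnt n.toNat (pvRunB hA n h (PySem.Set.add v (x, y)) [(x, y + 1)]) < f :=
      lt_of_le_of_lt (pvCnt_anti n.toNat (pvRunB_subset hA n h _ _)) hcnt1
    have h2 := pvStep hA n h f ih _ _ x (y - 1) h1 hcnt2
    have hcnt3 : pvCnt n.toNat (pvRunB hA n h _ [(x, y - 1)]) < f :=
      lt_of_le_of_lt (pvCnt_anti n.toNat (pvRunB_subset hA n h _ _)) hcnt2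
    have h3 := pvStep hA n h f ih _ _ (x + 1) y h2 hcnt3
    have hcnt4 : pvCnt n.toNat (pvRunB hA n h _ [(x + 1, y)]) < f :=
      lt_of_le_of_lt (pvCnt_anti n.toNat (pvRunB_subset hA n h _ _)) hcnt3
    exact pvStep hA n h f ih _ _ (x - 1) y h3 hcnt4

-- the inner scanning loop
theorem pvInner (hA : List (List Int)) (n h : Int) (x : Nat) (hx : x < n.toNat) :
    ∀ (ys : List Nat) (c : List (List Int)) (v : List (Int × Int)) (k : Int),
    (∀ y ∈ ys, y < n.toNat) → pvR n.toNat v c →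
    pvR n.toNat
      (ys.foldl (fun (st : List (Int × Int) × Int) (y : Nat) =>
        if ((x : Int), (y : Int)) ∉ st.1 ∧ h < pvGet2 hA x y then
          (pvRunB hA n h st.1 [((x : Int), (y : Int))], st.2 + 1)
        else st) (v, k)).1
      (ys.foldl (fun (st : List (List Int) × Int) y =>
        if pvGet2 st.1 x y = 0 ∧ pvGet2 (pvSunk hA n h) x y = 0 then
          (pvPaint (n.toNat * n.toNat + 1) st.1 (pvSunk hA n h) (x : Int) (y : Int) n, st.2 + 1)
        else st) (c, k)).1 ∧
    (ys.foldl (fun (st : List (List Int) × Int) y =>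
        if pvGet2 st.1 x y = 0 ∧ pvGet2 (pvSunk hA n h) x y = 0 then
          (pvPaint (n.toNat * n.toNat + 1) st.1 (pvSunk hA n h) (x : Int) (y : Int) n, st.2 + 1)
        else st) (c, k)).2 =
    (ys.foldl (fun (st : List (Int × Int) × Int) (y : Nat) =>
        if ((x : Int), (y : Int)) ∉ st.1 ∧ h < pvGet2 hA x y then
          (pvRunB hA n h st.1 [((x : Int), (y : Int))], st.2 + 1)
        else st) (v, k)).2 := by
  intro ys
  induction ys with
  | nil => intro c v k _ hR; exact ⟨hR, rfl⟩
  | cons y ys ih =>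
    intro c v k hys hR
    have hy : y < n.toNat := hys y List.mem_cons_self
    have hcheck : pvGet2 c x y = (if ((x : Int), (y : Int)) ∈ v then 1 else 0) :=
      hR.2 x y hx hy
    have hsunkc := pvSunk_char hA n h x y hx hy
    simp only [List.foldl_cons]
    by_cases hvm : ((x : Int), (y : Int)) ∈ v
    · have hgB : ¬ (((x : Int), (y : Int)) ∉ v ∧ h < pvGet2 hA x y) := by simp [hvm]
      have hgA : ¬ (pvGet2 c x y = 0 ∧ pvGet2 (pvSunk hA n h) x y = 0) := by
        simp [hcheck, hvm]
      rw [if_neg hgA, if_neg hgB]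
      exact ih c v k (fun z hz => hys z (List.mem_cons_of_mem _ hz)) hR
    · by_cases hsafe : h < pvGet2 hA x y
      · have hgB : ((x : Int), (y : Int)) ∉ v ∧ h < pvGet2 hA x y := ⟨hvm, hsafe⟩
        have hgA : pvGet2 c x y = 0 ∧ pvGet2 (pvSunk hA n h) x y = 0 := by
          refine ⟨by simp [hcheck, hvm], by rw [hsunkc, if_neg (by omega)]⟩
        rw [if_pos hgA, if_pos hgB]
        have hsim := pvSim hA n h (n.toNat * n.toNat + 1) v c (x : Int) (y : Int) hR
          (by have := pvCnt_le n.toNat v; omega)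
          (by
            refine ⟨by omega, by omega, by omega, by omega, hvm, ?_⟩
            simpa [Int.toNat_natCast] using hsafe)
        exact ih _ _ (k + 1) (fun z hz => hys z (List.mem_cons_of_mem _ hz)) hsim
      · have hgB : ¬ (((x : Int), (y : Int)) ∉ v ∧ h < pvGet2 hA x y) := by tauto
        have hgA : ¬ (pvGet2 c x y = 0 ∧ pvGet2 (pvSunk hA n h) x y = 0) := by
          rw [hsunkc, if_pos (by omega)]; simp
        rw [if_neg hgA, if_neg hgB]
        exact ih c v k (fun z hz => hys z (List.mem_cons_of_mem _ hz)) hR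

-- the outer scanning loop
theorem pvOuter (hA : List (List Int)) (n h : Int) :
    ∀ (xs : List Nat) (c : List (List Int)) (v : List (Int × Int)) (k : Int),
    (∀ x ∈ xs, x < n.toNat) → pvR n.toNat v c →
    pvR n.toNat
      (xs.foldl (fun (st : List (Int × Int) × Int) (x : Nat) =>
        (List.range n.toNat).foldl (fun st (y : Nat) =>
          if ((x : Int), (y : Int)) ∉ st.1 ∧ h < pvGet2 hA x y then
            (pvRunB hA n h st.1 [((x : Int), (y : Int))], st.2 + 1)
          else st) st) (v, k)).1
      (xs.foldl (fun (st : List (List Int) × Int) x =>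
        (List.range n.toNat).foldl (fun st y =>
          if pvGet2 st.1 x y = 0 ∧ pvGet2 (pvSunk hA n h) x y = 0 then
            (pvPaint (n.toNat * n.toNat + 1) st.1 (pvSunk hA n h) (x : Int) (y : Int) n, st.2 + 1)
          else st) st) (c, k)).1 ∧
    (xs.foldl (fun (st : List (List Int) × Int) x =>
        (List.range n.toNat).foldl (fun st y =>
          if pvGet2 st.1 x y = 0 ∧ pvGet2 (pvSunk hA n h) x y = 0 then
            (pvPaint (n.toNat * n.toNat + 1) st.1 (pvSunk hA n h) (x : Int) (y : Int) n, st.2 + 1)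
          else st) st) (c, k)).2 =
    (xs.foldl (fun (st : List (Int × Int) × Int) (x : Nat) =>
        (List.range n.toNat).foldl (fun st (y : Nat) =>
          if ((x : Int), (y : Int)) ∉ st.1 ∧ h < pvGet2 hA x y then
            (pvRunB hA n h st.1 [((x : Int), (y : Int))], st.2 + 1)
          else st) st) (v, k)).2 := by
  intro xs
  induction xs with
  | nil => intro c v k _ hR; exact ⟨hR, rfl⟩
  | cons x xs ih =>
    intro c v k hxs hR
    have hx : x < n.toNat := hxs x List.mem_cons_self
    simp only [List.foldl_cons]
    have hinner := pvInner hA n h x hx (List.range n.toNat) c v k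
      (fun z hz => List.mem_range.mp hz) hR
    obtain ⟨hR', hk'⟩ := hinner
    rw [← Prod.mk.eta (p := (List.range n.toNat).foldl (fun (st : List (List Int) × Int) y =>
        if pvGet2 st.1 x y = 0 ∧ pvGet2 (pvSunk hA n h) x y = 0 then
          (pvPaint (n.toNat * n.toNat + 1) st.1 (pvSunk hA n h) (x : Int) (y : Int) n, st.2 + 1)
        else st) (c, k)),
      ← Prod.mk.eta (p := (List.range n.toNat).foldl (fun (st : List (Int × Int) × Int) (y : Nat) =>
        if ((x : Int), (y : Int)) ∉ st.1 ∧ h < pvGet2 hA x y then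
          (pvRunB hA n h st.1 [((x : Int), (y : Int))], st.2 + 1)
        else st) (v, k)), hk']
    exact ih _ _ _ (fun z hz => hxs z (List.mem_cons_of_mem _ hz)) hR'

theorem pvTop (hA : List (List Int)) (n h : Int) :
    Sink hA n h = Sink_alt hA n h := by
  unfold Sink Sink_alt
  simp only []
  have hR0 : pvR n.toNat [] (pvZeros n.toNat) := by
    refine ⟨pvDims_zeros n.toNat, ?_⟩
    intro x y hx hy
    simp [pvGet2_zeros]
  have := pvOuter hA n h (List.range n.toNat) (pvZeros n.toNat) [] 0
    (fun z hz => List.mem_range.mp hz) hR0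
  exact this.2

-- ===== VERDICT (by name: the statement is the Claim_ definition above) =====
theorem Sink_spec : Claim_equal_Sink := by
  intro heightArr n height _ _
  unfold Spec_Sink
  exact pvTop heightArr n height
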